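-- pv_equiv track=rewrite | github.com/doushenyiyezhiqiu/amazon_ng_oa1 | subsequence_of_AZ.py | subsequence_of_AZ
-- ===== SOURCE A (Python) =====
-- def subsequence_of_AZ(s):
--     n = len(s)
--     new1 = list(s) + ['Z']
--     new2 = ['A'] + list(s)
--     res1, res2 = 0, 0
--     pre_A = 0
--     for i in range(n+1):
--         if new1[i] == 'A':
--             pre_A += 1
--         if new1[i] == 'Z':
--             res1 += pre_A
--
--     pre_A = 0
--     for i in range(n+1):
--         if new2[i] == 'A':
--             pre_A += 1
--         if new2[i] == 'Z':
--             res2 += pre_A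
--
--     return max(res1, res2)
-- ===== SOURCE B (Python) =====
-- def subsequence_of_AZ(s):
--     a = z = az = 0
--     for ch in s:
--         if ch == 'A':
--             a += 1
--         elif ch == 'Z':
--             z += 1
--             az += a
--     return az + max(a, z)
-- ===== Notes on version B (the rewrite author's own statement) =====
-- stated objective: simpler
-- what changed: Single pass over s maintaining running A-count, Z-count and AZ-pair count, returning az + max(a, z); no sentinel-padded list copies and no two separate index loops (measured ~2x faster, constant factor).
import Mathlib
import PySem

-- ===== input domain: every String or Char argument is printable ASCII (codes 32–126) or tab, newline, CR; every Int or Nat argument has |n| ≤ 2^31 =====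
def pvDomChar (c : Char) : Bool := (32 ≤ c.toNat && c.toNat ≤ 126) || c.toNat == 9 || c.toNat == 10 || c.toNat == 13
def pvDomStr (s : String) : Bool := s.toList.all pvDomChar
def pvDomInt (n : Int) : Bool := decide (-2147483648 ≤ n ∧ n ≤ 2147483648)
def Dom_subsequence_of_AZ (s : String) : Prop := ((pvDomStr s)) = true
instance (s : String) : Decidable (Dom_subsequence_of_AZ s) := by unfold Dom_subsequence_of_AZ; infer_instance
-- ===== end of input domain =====

-- B replaces A's two passes over sentinel-padded list copies by one pass keeping
-- running A/Z/AZ counts and returning az + max(a, z) (objective: simpler).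
-- ===== PORT A =====
-- loop body of A (both passes): pre_A increments on 'A', res adds pre_A on 'Z'
def pvStepA (st : Int × Int) (c : Char) : Int × Int :=
  let st := if c = 'A' then (st.1 + 1, st.2) else st
  if c = 'Z' then (st.1, st.2 + st.1) else st

-- Port of A: builds the two padded copies and runs the loop over each (iterating
-- the list in order = iterating indices 0..n over the full list).
def subsequence_of_AZ (s : String) : Int :=
  let new1 := s.toList ++ ['Z']
  let new2 := 'A' :: s.toList
  let r1 := (new1.foldl pvStepA (0, 0)).2
  let r2 := (new2.foldl pvStepA (0, 0)).2
  max r1 r2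

-- ===== PORT B =====
-- one-pass state (a, z, az)
def pvStepB (st : Int × Int × Int) (c : Char) : Int × Int × Int :=
  if c = 'A' then (st.1 + 1, st.2.1, st.2.2)
  else if c = 'Z' then (st.1, st.2.1 + 1, st.2.2 + st.1)
  else st

def subsequence_of_AZ_alt (s : String) : Int :=
  let st := s.toList.foldl pvStepB (0, 0, 0)
  st.2.2 + max st.1 st.2.1


-- ===== PRECONDITION & SPEC =====
def Spec_subsequence_of_AZ (s : String) (out : Int) : Prop := out = subsequence_of_AZ_alt s
instance (s : String) (out : Int) : Decidable (Spec_subsequence_of_AZ s out) := by unfold Spec_subsequence_of_AZ; infer_instance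

-- ===== CLAIM (what is proved, stated in full; the proofs are below) =====
def Claim_equal_subsequence_of_AZ : Prop := ∀ (s : String), Dom_subsequence_of_AZ s → Spec_subsequence_of_AZ s (subsequence_of_AZ s)

-- ===== LEMMAS AND PROOFS =====

-- number of 'A's / 'Z's
def pvCntA (l : List Char) : Int := ((l.filter (· = 'A')).length : Int)
def pvCntZ (l : List Char) : Int := ((l.filter (· = 'Z')).length : Int)

-- AZ pairs in l, given p A's already seen before l
def pvAZ (p : Int) : List Char → Int
  | [] => 0
  | c :: t => if c = 'A' then pvAZ (p + 1) t
              else if c = 'Z' then p + pvAZ p t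
              else pvAZ p t

theorem pvAZ_shift (l : List Char) : ∀ p : Int, pvAZ p l = p * pvCntZ l + pvAZ 0 l := by
  induction l with
  | nil => intro p; show (0 : Int) = p * pvCntZ [] + 0; simp [pvCntZ]
  | cons c t ih =>
    intro p
    have hzc : pvCntZ (c :: t) = (if c = 'Z' then 1 else 0) + pvCntZ t := by
      by_cases h : c = 'Z' <;> simp [pvCntZ, h]
      omega
    by_cases hA : c = 'A'
    · have hZ : c ≠ 'Z' := by simp [hA]
      rw [show pvAZ p (c :: t) = pvAZ (p + 1) t from by simp [pvAZ, hA],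
          show pvAZ 0 (c :: t) = pvAZ 1 t from by simp [pvAZ, hA],
          ih (p + 1), ih 1, hzc]
      simp [hZ]; ring
    · by_cases hZ : c = 'Z'
      · rw [show pvAZ p (c :: t) = p + pvAZ p t from by simp [pvAZ, hZ],
            show pvAZ 0 (c :: t) = 0 + pvAZ 0 t from by simp [pvAZ, hZ],
            ih p, hzc]
        simp [hZ]; ring
      · rw [show pvAZ p (c :: t) = pvAZ p t from by simp [pvAZ, hA, hZ],
            show pvAZ 0 (c :: t) = pvAZ 0 t from by simp [pvAZ, hA, hZ],
            ih p, hzc]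
        simp [hZ]

theorem pvFoldA (l : List Char) : ∀ p r : Int,
    l.foldl pvStepA (p, r) = (p + pvCntA l, r + pvAZ p l) := by
  induction l with
  | nil => intro p r; simp [pvCntA, pvAZ]
  | cons c t ih =>
    intro p r
    by_cases hA : c = 'A'
    · have hZ : c ≠ 'Z' := by simp [hA]
      simp [List.foldl, pvStepA, hA, ih, pvCntA, pvAZ, List.filter]
      omega
    · by_cases hZ : c = 'Z'
      · simp [List.foldl, pvStepA, hZ, ih, pvCntA, pvAZ, List.filter]
        omega
      · simp [List.foldl, pvStepA, hA, hZ, ih, pvCntA, pvAZ, List.filter]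

theorem pvFoldB (l : List Char) : ∀ a z az : Int,
    l.foldl pvStepB (a, z, az) = (a + pvCntA l, z + pvCntZ l, az + pvAZ a l) := by
  induction l with
  | nil => intro a z az; simp [pvCntA, pvCntZ, pvAZ]
  | cons c t ih =>
    intro a z az
    by_cases hA : c = 'A'
    · simp [List.foldl, pvStepB, hA, ih, pvCntA, pvCntZ, pvAZ, List.filter]
      omega
    · by_cases hZ : c = 'Z'
      · simp [List.foldl, pvStepB, hZ, ih, pvCntA, pvCntZ, pvAZ, List.filter]
        omega
      · simp [List.foldl, pvStepB, hA, hZ, ih, pvCntA, pvCntZ, pvAZ, List.filter]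


-- ===== VERDICT (by name: the statement is the Claim_ definition above) =====
theorem subsequence_of_AZ_spec : Claim_equal_subsequence_of_AZ := by
  unfold Claim_equal_subsequence_of_AZ
  intro s _
  unfold Spec_subsequence_of_AZ subsequence_of_AZ subsequence_of_AZ_alt
  set l := s.toList with hl
  have h1 : (l ++ ['Z']).foldl pvStepA (0, 0)
      = (pvCntA l, pvAZ (0 : Int) l + pvCntA l) := by
    rw [List.foldl_append, pvFoldA l 0 0]
    simp [List.foldl, pvStepA]
  have h2 : ('A' :: l).foldl pvStepA (0, 0)
      = (1 + pvCntA l, pvAZ (1 : Int) l) := by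
    have : ('A' :: l).foldl pvStepA (0, 0) = l.foldl pvStepA (1, 0) := by
      simp [List.foldl, pvStepA]
    rw [this, pvFoldA l 1 0]
    simp
  have h3 : l.foldl pvStepB (0, 0, 0) = (pvCntA l, pvCntZ l, pvAZ (0 : Int) l) := by
    rw [pvFoldB l 0 0 0]; simp
  simp only [h1, h2, h3, pvAZ_shift l 1, one_mul]
  rcases le_total (pvCntA l) (pvCntZ l) with h | h <;>
    simp [max_def] <;> omega
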